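-- pv_equiv track=rewrite | github.com/miliar/Code_Jam_Webscraper | solutions_python/solutions_year15_round0_nr1/1117.py | calculate
-- ===== SOURCE A (Python) =====
-- def calculate(maximum, array):
--     """docstring for claculate"""
--     count = 0
--     sum = 0
--     for i in range(maximum + 1):
--         cur = int(array[i])
--         if i - sum > 0 and cur > 0:
--             count = max(count, i - sum)
--         sum += cur
--     return count
-- ===== SOURCE B (Python) =====
-- def calculate(maximum, array):
--     """docstring for claculate"""
--     total = sum(int(array[i]) for i in range(maximum + 1))
--     best = 0
--     suffix = 0
--     for i in range(maximum, -1, -1):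
--         v = int(array[i])
--         suffix += v
--         deficit = i - (total - suffix)
--         if v > 0 and deficit > 0:
--             best = max(best, deficit)
--     return best
-- ===== Notes on version B (the rewrite author's own statement) =====
-- stated objective: alternative
-- what changed: A scans forward once keeping a running prefix sum; B first computes the grand total, then scans the indices BACKWARD keeping a suffix sum and recovers each prefix sum as total minus suffix, taking the max of the deficits in reverse order.
import Mathlib
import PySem

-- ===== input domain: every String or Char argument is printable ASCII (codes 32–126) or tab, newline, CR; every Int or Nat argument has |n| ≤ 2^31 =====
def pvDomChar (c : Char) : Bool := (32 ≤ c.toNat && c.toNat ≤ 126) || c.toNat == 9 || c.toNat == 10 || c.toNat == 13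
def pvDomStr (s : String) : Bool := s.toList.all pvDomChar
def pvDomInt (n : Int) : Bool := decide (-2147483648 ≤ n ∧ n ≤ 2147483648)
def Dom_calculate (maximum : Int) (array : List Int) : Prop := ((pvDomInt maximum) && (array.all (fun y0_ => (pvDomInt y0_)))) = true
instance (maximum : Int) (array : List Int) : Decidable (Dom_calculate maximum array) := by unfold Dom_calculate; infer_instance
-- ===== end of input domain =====

-- B replaces A's forward running-prefix-sum loop by a total computed up front and a
-- BACKWARD scan with a suffix sum (prefix = total - suffix) (objective: alternative).

-- ===== PORT A =====
def calculate (maximum : Int) (array : List Int) : Int :=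
  ((PySem.List.pyRange 0 (maximum + 1) 1).foldl
    (fun (st : Int × Int) i =>
      let cur := PySem.List.pyGetD array i 0
      ((if i - st.2 > 0 ∧ cur > 0 then max st.1 (i - st.2) else st.1), st.2 + cur))
    (0, 0)).1

-- ===== PORT B =====
def calculate_alt (maximum : Int) (array : List Int) : Int :=
  let total := ((PySem.List.pyRange 0 (maximum + 1) 1).map
    (fun i => PySem.List.pyGetD array i 0)).sum
  ((PySem.List.pyRange maximum (-1) (-1)).foldl
    (fun (st : Int × Int) i =>
      let v := PySem.List.pyGetD array i 0
      let suffix := st.2 + v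
      let deficit := i - (total - suffix)
      ((if v > 0 ∧ deficit > 0 then max st.1 deficit else st.1), suffix))
    (0, 0)).1

-- ===== PRECONDITION & SPEC =====
-- Pre_ excludes exactly the inputs where A raises IndexError: maximum ≥ len(array).
def Pre_calculate (maximum : Int) (array : List Int) : Prop :=
  maximum < (array.length : Int)
instance (maximum : Int) (array : List Int) : Decidable (Pre_calculate maximum array) := by
  unfold Pre_calculate; infer_instance

def pvWitness_calculate : Int × List Int := (2, [0, 1, 0])

def Spec_calculate (maximum : Int) (array : List Int) (out : Int) : Prop := out = calculate_alt maximum array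
instance (maximum : Int) (array : List Int) (out : Int) : Decidable (Spec_calculate maximum array out) := by unfold Spec_calculate; infer_instance

-- ===== CLAIM (what is proved, stated in full; the proofs are below) =====
def Claim_equal_calculate : Prop := ∀ (maximum : Int) (array : List Int), Dom_calculate maximum array → Pre_calculate maximum array → Spec_calculate maximum array (calculate maximum array)

-- ===== LEMMAS AND PROOFS =====

-- value at index j, as both ports read it
def pvG (array : List Int) (i : Int) : Int := PySem.List.pyGetD array i 0

-- sum of the first k values (prefix sum)
def pvS (array : List Int) (k : Nat) : Int :=
  ((List.range k).map (fun j => pvG array (Nat.cast j))).sum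

-- the pure candidate function both sides reduce to
def pvH (array : List Int) (i : Int) : Option Int :=
  if pvG array i > 0 ∧ i - pvS array i.toNat > 0 then some (i - pvS array i.toNat) else none

theorem pvS_succ (array : List Int) (k : Nat) :
    pvS array (k + 1) = pvS array k + pvG array (k : Int) := by
  simp [pvS, List.range_succ]

-- the main invariant for A: its fold over range m carries (fold of max over candidates, prefix sum)
theorem pv_main (array : List Int) : ∀ (m : Nat),
    (((List.range m).map (Nat.cast : Nat → Int)).foldl
      (fun (st : Int × Int) i =>
        ((if i - st.2 > 0 ∧ PySem.List.pyGetD array i 0 > 0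
          then max st.1 (i - st.2) else st.1), st.2 + PySem.List.pyGetD array i 0))
      (0, 0))
    = ((((List.range m).map (Nat.cast : Nat → Int)).filterMap (pvH array)).foldl max 0,
       pvS array m) := by
  intro m
  induction m with
  | zero => simp [pvS]
  | succ m ih =>
    rw [List.range_succ, List.map_append, List.foldl_append, ih]
    simp only [List.map_cons, List.map_nil, List.foldl_cons, List.foldl_nil,
      List.filterMap_append, List.filterMap_cons, List.filterMap_nil]
    rw [pvS_succ]
    by_cases hc : (m : Int) - pvS array m > 0 ∧ pvG array (m : Int) > 0
    · have hH : pvH array (m : Int) = some ((m : Int) - pvS array m) := by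
        simp only [pvH, Int.toNat_natCast]
        rw [if_pos ⟨hc.2, hc.1⟩]
      rw [hH]
      have hc' := hc
      simp only [pvG] at hc'
      rw [if_pos ⟨hc'.1, hc'.2⟩]
      simp [pvG]
    · have hH : pvH array (m : Int) = none := by
        simp only [pvH, Int.toNat_natCast]
        rw [if_neg (by tauto)]
      rw [hH]
      have hc' := hc
      simp only [pvG] at hc'
      rw [if_neg (by tauto)]
      simp [pvG]

-- the invariant for B's backward scan: folding over the reversed index list with a
-- suffix accumulator produces the fold of max over the (reversed) candidate list,
-- provided total = starting suffix + prefix sum of the whole scanned range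
theorem pv_rev (array : List Int) (total : Int) : ∀ (m : Nat) (best suf : Int),
    total = suf + pvS array m →
    (((List.range m).map (Nat.cast : Nat → Int)).reverse.foldl
      (fun (st : Int × Int) i =>
        ((if PySem.List.pyGetD array i 0 > 0 ∧ i - (total - (st.2 + PySem.List.pyGetD array i 0)) > 0
          then max st.1 (i - (total - (st.2 + PySem.List.pyGetD array i 0))) else st.1),
         st.2 + PySem.List.pyGetD array i 0))
      (best, suf))
    = ((((List.range m).map (Nat.cast : Nat → Int)).reverse.filterMap (pvH array)).foldl max best,
       total) := by
  intro m
  induction m with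
  | zero => intro best suf h; simp [pvS] at h; simp [h]
  | succ m ih =>
    intro best suf h
    rw [List.range_succ, List.map_append, List.reverse_append]
    simp only [List.map_cons, List.map_nil, List.reverse_cons, List.reverse_nil,
      List.nil_append, List.cons_append, List.foldl_cons, List.filterMap_cons]
    have hg : PySem.List.pyGetD array ((m : Nat) : Int) 0 = pvG array (m : Int) := rfl
    rw [hg]
    rw [pvS_succ] at h
    have hsuf : total - (suf + pvG array (m : Int)) = pvS array m := by omega
    have hdef : (m : Int) - (total - (suf + pvG array (m : Int)))
        = (m : Int) - pvS array m := by omega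
    by_cases hc : pvG array (m : Int) > 0 ∧ (m : Int) - pvS array m > 0
    · have hH : pvH array (m : Int) = some ((m : Int) - pvS array m) := by
        simp only [pvH, Int.toNat_natCast]; rw [if_pos hc]
      rw [hH, hdef]
      rw [if_pos (by exact ⟨hc.1, hc.2⟩)]
      rw [ih (max best ((m : Int) - pvS array m)) (suf + pvG array (m : Int)) (by omega)]
      simp
    · have hH : pvH array (m : Int) = none := by
        simp only [pvH, Int.toNat_natCast]; rw [if_neg hc]
      rw [hH, hdef]
      rw [if_neg hc]
      rw [ih best (suf + pvG array (m : Int)) (by omega)]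

-- max is right-commutative, so the fold of max is permutation-invariant
theorem pv_foldl_max_reverse (l : List Int) (b : Int) :
    l.reverse.foldl max b = l.foldl max b := by
  haveI : RightCommutative (max : Int → Int → Int) := ⟨fun x y z => by omega⟩
  exact (List.reverse_perm l).foldl_eq b

-- the total B computes up front is the prefix sum of the whole range
theorem pv_total (array : List Int) (n : Nat) :
    ((((List.range n).map (Nat.cast : Nat → Int)).map (fun i => PySem.List.pyGetD array i 0)).sum)
      = pvS array n := by
  rw [List.map_map]; rfl

-- ===== VERDICT (by name: the statement is the Claim_ definition above) =====
theorem calculate_spec : Claim_equal_calculate := by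
  intro maximum array _ _
  unfold Spec_calculate calculate calculate_alt
  dsimp only
  rcases (by omega : maximum + 1 ≤ 0 ∨ 0 < maximum + 1) with h | h
  · rw [PySem.List.pyRange_one_eq_nil h, PySem.List.pyRange_neg_one_eq_nil (by omega)]
    simp
  · have hcast : maximum + 1 = ((maximum + 1).toNat : Int) := by omega
    have hrev : PySem.List.pyRange maximum (-1) (-1)
        = (PySem.List.pyRange 0 (maximum + 1) 1).reverse := by
      rw [PySem.List.pyRange_neg_one_eq_reverse]; norm_num
    rw [hrev, hcast, PySem.List.pyRange_zero_natCast, pv_total]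
    rw [pv_main array (maximum + 1).toNat]
    rw [pv_rev array (pvS array (maximum + 1).toNat) (maximum + 1).toNat 0 0 (by simp)]
    simp only
    rw [List.filterMap_reverse, pv_foldl_max_reverse]
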